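-- pv_equiv track=rewrite | github.com/MSandovalM/myadvento2025 | 6.py | parse_input_second
-- ===== SOURCE A (Python) =====
-- def transpose_lists(original_array:list[list[int]]):
--     return [list(line) for line in zip(*original_array)]
--
-- def normalize_line(line: str) -> str:
--     result = ""
--     i = 0
--
--     while i < len(line):
--         block = line[i:i+3]
--         digits = block.strip()
--         if digits:
--             missing = 3 - len(digits)
--
--             if block.startswith(" "):
--                 block = "x" * missing + digits
--             elif block.endswith(" "):
--                 block = digits + "x" * missing
--             else:
--                 block = digits
--
--         result += block
--
--         i += 4
--
--     return result
--
-- def split_chunks(string, size_chunks):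
--     return [string[char:char + size_chunks] for char in range(0, len(string), size_chunks)]
--
-- def parse_input_second(raw_input:str) -> tuple[list[str], list[str]]:
--     array_2d = raw_input.splitlines()
--     opts = array_2d.pop()
--     number_lists_str = []
--
--     opts_list =  " ".join(opts.split()).split(" ")
--
--     for values in array_2d:
--         new_line = normalize_line(values)
--         new_line_list = split_chunks(new_line, 3)
--         number_lists_str.append(new_line_list)
--
--     t_num_list = transpose_lists(number_lists_str)
--
--     t_matrix = [transpose_lists(element) for element in t_num_list]
--
--     real_proces_nums = []
--
--     for matrix in t_matrix:
--         real_num_list = []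
--         for value in matrix:
--             raw_val = "".join(value).replace("x", "")
--             real_num = int(raw_val)
--             real_num_list.append(real_num)
--
--         real_proces_nums.append(real_num_list)
--
--     return (opts_list, real_proces_nums)
-- ===== SOURCE B (Python) =====
-- def normalize_line(line: str) -> str:
--     result = ""
--     i = 0
--     while i < len(line):
--         block = line[i:i+3]
--         digits = block.strip()
--         if digits:
--             missing = 3 - len(digits)
--             if block.startswith(" "):
--                 block = "x" * missing + digits
--             elif block.endswith(" "):
--                 block = digits + "x" * missing
--             else:
--                 block = digits
--         result += block
--         i += 4
--     return result
--
--
-- def parse_input_second(raw_input: str):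
--     lines = raw_input.splitlines()
--     opts_list = " ".join(lines[-1].split()).split(" ")
--     norm = [normalize_line(line) for line in lines[:-1]]
--     results = []
--     if norm:
--         width = min(len(s) for s in norm)
--         for start in range(0, width, 3):
--             results.append([int("".join(s[k] for s in norm).replace("x", ""))
--                             for k in range(start, min(start + 3, width))])
--     return (opts_list, results)
-- ===== Notes on version B (the rewrite author's own statement) =====
-- stated objective: alternative
-- what changed: B keeps normalize_line but removes split_chunks and both zip(*...)-based transposes entirely: it truncates the normalized lines to their common minimum width and assembles each vertical number at a flat character position, grouping positions into threes arithmetically (range(0, width, 3)).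
import Mathlib
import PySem

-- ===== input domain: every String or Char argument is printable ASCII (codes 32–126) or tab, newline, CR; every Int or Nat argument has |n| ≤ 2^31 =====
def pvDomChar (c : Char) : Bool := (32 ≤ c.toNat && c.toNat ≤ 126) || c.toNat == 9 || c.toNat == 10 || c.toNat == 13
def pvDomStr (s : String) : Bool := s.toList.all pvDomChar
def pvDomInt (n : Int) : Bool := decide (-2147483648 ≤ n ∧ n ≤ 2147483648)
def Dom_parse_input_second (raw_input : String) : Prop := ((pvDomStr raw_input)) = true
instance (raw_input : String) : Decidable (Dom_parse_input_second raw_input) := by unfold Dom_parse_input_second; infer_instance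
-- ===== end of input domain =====

-- B drops split_chunks and both zip(*…) transposes entirely: it truncates the normalized
-- lines to their common minimum width and reads each vertical number at a flat character
-- position, grouping by threes arithmetically (objective: alternative decomposition, same cost).

-- ===== PORT A =====
-- shared helper: normalize_line (identical in Source A and Source B), ported on List Char
def pvNormBlock (block : List Char) : List Char :=
  let digits := PySem.Chars.strip block
  if digits ≠ [] then
    let missing := 3 - digits.length
    if PySem.Chars.startswith block [' '] then List.replicate missing 'x' ++ digits
    else if PySem.Chars.endswith block [' '] then digits ++ List.replicate missing 'x'
    else digits
  else block

-- the while loop with stride i += 4 as structural recursion: block = line[i:i+3] is the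
-- first three of the remaining characters, the next iteration sees the rest from i + 4
def pvNormalizeLine : List Char → List Char
  | [] => []
  | a :: b :: c :: _ :: rest => pvNormBlock [a, b, c] ++ pvNormalizeLine rest
  | line => pvNormBlock line

-- A-side helper: split_chunks with size_chunks = 3 (its only call site); same fuel pattern
def pvSplitChunksGo (fuel : Nat) (s : List Char) : List (List Char) :=
  match fuel, s with
  | 0, _ => []
  | _, [] => []
  | fuel + 1, s => s.take 3 :: pvSplitChunksGo fuel (s.drop 3)

def pvSplitChunks3 (s : List Char) : List (List Char) :=
  pvSplitChunksGo s.length s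

-- A-side helper: the per-line chunk grid A builds
def pvGrid (raw_input : String) : List (List (List Char)) :=
  ((PySem.Str.splitlines raw_input).dropLast).map
    (fun v => pvSplitChunks3 (pvNormalizeLine v.toList))

-- shared helper: the opts line (" ".join(opts.split()).split(" ") is identical in both programs)
def pvOpts (raw_input : String) : List String :=
  let opts := (PySem.Str.splitlines raw_input).getLastD ""
  (PySem.Str.split? (PySem.Str.join " " (PySem.Str.split₀ opts)) " ").getD []

-- A's transpose_lists = [list(line) for line in zip(*xs)] (zip truncates to the shortest
-- list; the fuel is the length of the first list, an upper bound on the number of rows)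
def pvZipStarGo {α : Type} [Inhabited α] (fuel : Nat) (ls : List (List α)) : List (List α) :=
  match fuel with
  | 0 => []
  | fuel + 1 =>
    if ls = [] ∨ ls.any List.isEmpty then []
    else (ls.map List.headI) :: pvZipStarGo fuel (ls.map List.tail)

def pvZipStar {α : Type} [Inhabited α] (ls : List (List α)) : List (List α) :=
  pvZipStarGo ls.headI.length ls

-- shared helper: int("".join(value).replace("x","")) (identical in both programs) with
-- ValueError excluded by Pre_ (the getD is unreachable inside Pre_)
def pvNum (value : List Char) : Int :=
  (PySem.Int.ofChars? (PySem.Chars.replace value ['x'] [])).getD 0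

def parse_input_second (raw_input : String) : List String × List (List Int) :=
  -- array_2d = raw_input.splitlines(); opts = array_2d.pop()  (pop on [] raises → Pre_)
  let opts_list := pvOpts raw_input
  let number_lists_str := pvGrid raw_input
  let t_num_list := pvZipStar number_lists_str
  let t_matrix := t_num_list.map (fun element => pvZipStar element)
  let real_proces_nums := t_matrix.map (fun matrix => matrix.map (fun value => pvNum value))
  (opts_list, real_proces_nums)

-- ===== PORT B =====
def parse_input_second_alt (raw_input : String) : List String × List (List Int) :=
  let lines := PySem.Str.splitlines raw_input
  let opts_list := pvOpts raw_input
  let norm := lines.dropLast.map (fun line => pvNormalizeLine line.toList)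
  let results :=
    if norm = [] then []
    else
      let width := (PySem.List.min? (norm.map List.length) (fun x => x)).getD 0
      (PySem.List.pyRange 0 (width : Int) 3).map (fun start =>
        (PySem.List.pyRange start (min (start + 3) (width : Int)) 1).map (fun k =>
          -- s[k]: k is in range here (0 ≤ start ≤ k < width ≤ len(s)), so getD is exact
          pvNum (norm.map (fun s => PySem.List.pyGetD s k ' '))))
  (opts_list, results)

-- ===== PRECONDITION & SPEC =====
-- Pre_ excludes exactly the inputs where A raises: empty input (array_2d.pop() raises
-- IndexError) and inputs where some assembled vertical digit string is not a valid
-- int() literal (int(raw_val) raises ValueError).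
-- (the digit condition necessarily refers to the normalized lines — whether int() succeeds
-- is a property of the assembled vertical digit strings; it is stated here in the flat
-- per-position form, not by replaying either program's chunk/transpose structure)
def Pre_parse_input_second (raw_input : String) : Prop :=
  PySem.Str.splitlines raw_input ≠ [] ∧
  ∀ k ∈ List.range ((PySem.List.min?
      ((((PySem.Str.splitlines raw_input).dropLast).map (fun line => pvNormalizeLine line.toList)).map List.length)
      (fun x => x)).getD 0),
    (PySem.Int.ofChars? (PySem.Chars.replace
      ((((PySem.Str.splitlines raw_input).dropLast).map (fun line => pvNormalizeLine line.toList)).map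
        (fun s => s.getD k ' ')) ['x'] [])).isSome = true
instance (raw_input : String) : Decidable (Pre_parse_input_second raw_input) := by
  unfold Pre_parse_input_second; infer_instance

def pvWitness_parse_input_second : String := "  1 22\n333 4 \n *  + "

def Spec_parse_input_second (raw_input : String) (out : List String × List (List Int)) : Prop := out = parse_input_second_alt raw_input
instance (raw_input : String) (out : List String × List (List Int)) : Decidable (Spec_parse_input_second raw_input out) := by unfold Spec_parse_input_second; infer_instance

-- ===== CLAIM (what is proved, stated in full; the proofs are below) =====
def Claim_equal_parse_input_second : Prop := ∀ (raw_input : String), Dom_parse_input_second raw_input → Pre_parse_input_second raw_input → Spec_parse_input_second raw_input (parse_input_second raw_input)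

-- ===== LEMMAS AND PROOFS =====

-- zip(*ls) as an indexed traversal: if m is the minimum length of the lists of ls (ls ≠ [])
-- and the fuel is at least m, the transpose is the table of entries ls[j][i] for i < m.
lemma pvZipStarGo_eq_range {α : Type} [Inhabited α] (d : α) :
    ∀ (m fuel : Nat) (ls : List (List α)), m ≤ fuel → ls ≠ [] →
      (∀ l ∈ ls, m ≤ l.length) → (∃ l ∈ ls, l.length = m) →
      pvZipStarGo fuel ls = (List.range m).map (fun i => ls.map (fun l => l.getD i d)) := by
  intro m
  induction m with
  | zero =>
    intro fuel ls _ hne _ hex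
    obtain ⟨l, hl, hlen⟩ := hex
    have hany : ls.any List.isEmpty := by
      simp only [List.any_eq_true]
      exact ⟨l, hl, by simp [List.length_eq_zero_iff.mp hlen]⟩
    cases fuel with
    | zero => simp [pvZipStarGo]
    | succ f => simp [pvZipStarGo, hany]
  | succ m ih =>
    intro fuel ls hfuel hne hall hex
    have hnoempty : ls.any List.isEmpty = false := by
      simp only [List.any_eq_false]
      intro l hl
      have := hall l hl
      simp only [List.isEmpty_iff]
      intro h
      simp [h] at this
    cases fuel with
    | zero => omega
    | succ f =>
      rw [pvZipStarGo, if_neg (by simp [hne, hnoempty])]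
      have step : pvZipStarGo f (ls.map List.tail)
          = (List.range m).map (fun i => (ls.map List.tail).map (fun l => l.getD i d)) := by
        apply ih
        · omega
        · simp [hne]
        · intro l hl
          simp only [List.mem_map] at hl
          obtain ⟨l', hl', rfl⟩ := hl
          have := hall l' hl'
          simp [List.length_tail]
          omega
        · obtain ⟨l, hl, hlen⟩ := hex
          exact ⟨l.tail, List.mem_map_of_mem hl, by simp [List.length_tail, hlen]⟩
      rw [step, List.range_succ_eq_map, List.map_cons, List.map_map]
      congr 1
      · apply List.map_congr_left
        intro l hl
        have h1 : 1 ≤ l.length := le_trans (by omega) (hall l hl)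
        cases l with
        | nil => simp at h1
        | cons x xs => simp [List.headI]
      · apply List.map_congr_left
        intro i _
        simp only [Function.comp, List.map_map]
        apply List.map_congr_left
        intro l _
        cases l <;> simp [Nat.succ_eq_add_one]

-- instantiating the minimum with A's min? expression
lemma pvZipStar_eq_min {α : Type} [Inhabited α] (d : α) (ls : List (List α)) (hne : ls ≠ []) :
    pvZipStar ls = (List.range ((PySem.List.min? (ls.map (fun l => l.length)) (fun x => x)).getD 0)).map
      (fun i => ls.map (fun l => l.getD i d)) := by
  have hmapne : ls.map (fun l : List α => l.length) ≠ [] := by simp [hne]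
  cases hmin : PySem.List.min? (ls.map (fun l : List α => l.length)) (fun x => x) with
  | none => exact absurd ((PySem.List.min?_eq_none_iff _ _).mp hmin) hmapne
  | some m =>
    have hmem : ∃ l ∈ ls, l.length = m := by
      have := PySem.List.min?_mem hmin
      simp only [List.mem_map] at this
      obtain ⟨l, hl, hlen⟩ := this
      exact ⟨l, hl, hlen⟩
    have hmin' : ∀ l ∈ ls, m ≤ l.length := fun l hl =>
      PySem.List.min?_isMin hmin l.length (List.mem_map_of_mem hl)
    have hfuel : m ≤ ls.headI.length := by
      cases ls with
      | nil => exact absurd rfl hne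
      | cons a t =>
        have := hmin' a (by simp)
        simpa [List.headI] using this
    rw [Option.getD_some]
    exact pvZipStarGo_eq_range d m ls.headI.length ls hfuel hne hmin' hmem

-- the minimum value of a monotone image is the image of the minimum value
lemma pv_min_map_mono (xs : List Nat) (g : Nat → Nat) (hg : Monotone g) (hne : xs ≠ []) :
    (PySem.List.min? (xs.map g) (fun x => x)).getD 0 = g ((PySem.List.min? xs (fun x => x)).getD 0) := by
  cases hmin : PySem.List.min? xs (fun x => x) with
  | none => exact absurd ((PySem.List.min?_eq_none_iff _ _).mp hmin) hne
  | some m =>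
    have hmapne : xs.map g ≠ [] := by simp [hne]
    cases hmin2 : PySem.List.min? (xs.map g) (fun x => x) with
    | none => exact absurd ((PySem.List.min?_eq_none_iff _ _).mp hmin2) hmapne
    | some m' =>
      simp only [Option.getD_some]
      have hm_mem : m ∈ xs := PySem.List.min?_mem hmin
      have hm'_mem : m' ∈ xs.map g := PySem.List.min?_mem hmin2
      apply le_antisymm
      · exact PySem.List.min?_isMin hmin2 (g m) (List.mem_map_of_mem hm_mem)
      · obtain ⟨y, hy, rfl⟩ := List.mem_map.mp hm'_mem
        exact hg (PySem.List.min?_isMin hmin y hy)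

-- fuel irrelevance for split_chunks
lemma pvSplitChunksGo_congr : ∀ (f1 f2 : Nat) (s : List Char), s.length ≤ f1 → s.length ≤ f2 →
    pvSplitChunksGo f1 s = pvSplitChunksGo f2 s := by
  intro f1
  induction f1 with
  | zero =>
    intro f2 s h1 _
    have : s = [] := List.length_eq_zero_iff.mp (by omega)
    subst this
    cases f2 <;> simp [pvSplitChunksGo]
  | succ f ih =>
    intro f2 s h1 h2
    cases s with
    | nil => cases f2 <;> simp [pvSplitChunksGo]
    | cons a t =>
      cases f2 with
      | zero => simp at h2
      | succ f2' =>
        simp only [pvSplitChunksGo]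
        congr 1
        apply ih
        · simp at h1 ⊢; omega
        · simp at h2 ⊢; omega

lemma pvSplitChunks3_cons (s : List Char) (hs : s ≠ []) :
    pvSplitChunks3 s = s.take 3 :: pvSplitChunks3 (s.drop 3) := by
  unfold pvSplitChunks3
  cases s with
  | nil => exact absurd rfl hs
  | cons a t =>
    simp only [List.length_cons, pvSplitChunksGo]
    congr 1
    exact pvSplitChunksGo_congr _ _ _ (by simp) le_rfl

-- chunk count is ceiling division by 3
lemma pv_length_chunks (s : List Char) : (pvSplitChunks3 s).length = (s.length + 2) / 3 := by
  generalize hn : s.length = n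
  induction n using Nat.strong_induction_on generalizing s with
  | _ n ih =>
    cases s with
    | nil => simp at hn; subst hn; simp [pvSplitChunks3, pvSplitChunksGo]
    | cons a t =>
      rw [pvSplitChunks3_cons _ (by simp), List.length_cons,
        ih ((a :: t).drop 3).length (by simp at hn ⊢; omega) _ rfl]
      simp at hn ⊢
      omega

-- the c-th chunk is the 3-character window at flat position 3c
lemma pv_getD_chunks : ∀ (c : Nat) (s : List Char),
    (pvSplitChunks3 s).getD c [] = (s.drop (3 * c)).take 3 := by
  intro c
  induction c with
  | zero =>
    intro s
    cases s with
    | nil => simp [pvSplitChunks3, pvSplitChunksGo]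
    | cons a t => rw [pvSplitChunks3_cons _ (by simp)]; simp
  | succ c ih =>
    intro s
    cases s with
    | nil => simp [pvSplitChunks3, pvSplitChunksGo]
    | cons a t =>
      rw [pvSplitChunks3_cons _ (by simp)]
      simp only [List.getD_cons_succ, ih]
      congr 1
      rw [List.drop_drop]
      congr 1
      omega

-- a character of a chunk is a character of the flat normalized line
lemma pv_getD_window (s : List Char) (c p : Nat) (hp : p < 3) :
    ((s.drop (3 * c)).take 3).getD p ' ' = s.getD (3 * c + p) ' ' := by
  simp only [List.getD, List.getElem?_take, List.getElem?_drop, hp, if_pos]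

-- ===== VERDICT (by name: the statement is the Claim_ definition above) =====
theorem parse_input_second_spec : Claim_equal_parse_input_second := by
  intro raw_input _ _
  unfold Spec_parse_input_second parse_input_second parse_input_second_alt
  simp only
  congr 1
  -- the numeric halves
  set norm : List (List Char) :=
    ((PySem.Str.splitlines raw_input).dropLast).map (fun line => pvNormalizeLine line.toList) with hnorm
  have hgrid : pvGrid raw_input = norm.map pvSplitChunks3 := by
    rw [hnorm, List.map_map]; rfl
  by_cases hne : norm = []
  · rw [if_pos hne, hgrid, hne]
    rfl
  · rw [if_neg hne]
    have hgridne : norm.map pvSplitChunks3 ≠ [] := by simp [hne]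
    rw [hgrid, pvZipStar_eq_min ([] : List Char) _ hgridne]
    set width : Nat := (PySem.List.min? (norm.map List.length) (fun x => x)).getD 0 with hwidth
    -- A's outer count = ⌈width/3⌉
    have houter : (PySem.List.min? ((norm.map pvSplitChunks3).map (fun l => l.length)) (fun x => x)).getD 0
        = (width + 2) / 3 := by
      have : (norm.map pvSplitChunks3).map (fun l => l.length)
          = (norm.map List.length).map (fun L => (L + 2) / 3) := by
        simp only [List.map_map]
        exact List.map_congr_left (fun s _ => pv_length_chunks s)
      rw [this, pv_min_map_mono _ _ (fun a b hab => Nat.div_le_div_right (Nat.add_le_add_right hab 2)) (by simp [hne])]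
    rw [houter]
    -- B's outer range
    rw [PySem.List.pyRange_of_pos 0 (width : Int) (by norm_num)]
    have hcount : (if (0 : Int) < (width : Int) then (((width : Int) - 0 + 3 - 1) / 3).toNat else 0)
        = (width + 2) / 3 := by
      split_ifs with h
      · omega
      · omega
    rw [hcount]
    simp only [List.map_map]
    apply List.map_congr_left
    intro c hc
    simp only [Function.comp]
    rw [← List.map_map]
    -- column c
    have hcol : (norm.map pvSplitChunks3).map (fun l => l.getD c []) =
        norm.map (fun s => (s.drop (3 * c)).take 3) := by
      rw [List.map_map]
      exact List.map_congr_left (fun s _ => pv_getD_chunks c s)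
    have hcolne : (norm.map pvSplitChunks3).map (fun l => l.getD c []) ≠ [] := by simp [hne]
    rw [pvZipStar_eq_min (' ') _ hcolne]
    -- A's inner count = min 3 (width - 3c)
    have hinner : (PySem.List.min? (((norm.map pvSplitChunks3).map (fun l => l.getD c [])).map
        (fun l => l.length)) (fun x => x)).getD 0 = min 3 (width - 3 * c) := by
      rw [hcol, List.map_map]
      simp only [Function.comp_def]
      have : norm.map (fun s => ((s.drop (3 * c)).take 3).length)
          = (norm.map List.length).map (fun L => min 3 (L - 3 * c)) := by
        simp only [List.map_map]
        apply List.map_congr_left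
        intro s _
        simp only [Function.comp, List.length_take, List.length_drop]
      rw [this, pv_min_map_mono _ _ (fun a b hab => min_le_min le_rfl (Nat.sub_le_sub_right hab _)) (by simp [hne])]
    rw [hinner, PySem.List.pyRange_one]
    have hlen : ((min ((0 : Int) + 3 * (c : Nat) + 3) (width : Int)) - ((0 : Int) + 3 * (c : Nat))).toNat
        = min 3 (width - 3 * c) := by omega
    rw [hlen]
    simp only [List.map_map, Function.comp_def]
    apply List.map_congr_left
    intro p hp
    have hp3 : p < 3 := by simp only [List.mem_range] at hp; omega
    congr 1
    apply List.map_congr_left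
    intro s _
    rw [pv_getD_chunks, pv_getD_window s c p hp3]
    have : ((0 : Int) + 3 * (c : Nat) + (p : Nat)) = ((3 * c + p : Nat) : Int) := by push_cast; ring
    rw [this, PySem.List.pyGetD_natCast]
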